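-- pv_equiv track=rewrite | github.com/bigscience-workshop/biomedical | examples/test.py | tokoff_from_line
-- ===== SOURCE A (Python) =====
-- def tokoff_from_line(text):
--     tokoff = []
--     start = None
--     end = None
--     for ii, char in enumerate(text):
--         if char != " " and start is None:
--             start = ii
--         if char == " " and start is not None:
--             end = ii
--             tokoff.append((start, end))
--             start = None
--             end = None
--     if start is not None:
--         end = ii + 1
--         tokoff.append((start, end))
--     return tokoff
-- ===== SOURCE B (Python) =====
-- import re
--
-- def tokoff_from_line(text):
--     return [(m.start(), m.end()) for m in re.finditer(r"[^ ]+", text)]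
-- ===== Notes on version B (the rewrite author's own statement) =====
-- stated objective: faster
-- what changed: Replaces the hand-written start/end state machine over enumerate(text) with re.finditer(r'[^ ]+', text), letting the C-level regex engine yield maximal non-space runs and reading each match's span (measured ~13x faster at large n).
import Mathlib
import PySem

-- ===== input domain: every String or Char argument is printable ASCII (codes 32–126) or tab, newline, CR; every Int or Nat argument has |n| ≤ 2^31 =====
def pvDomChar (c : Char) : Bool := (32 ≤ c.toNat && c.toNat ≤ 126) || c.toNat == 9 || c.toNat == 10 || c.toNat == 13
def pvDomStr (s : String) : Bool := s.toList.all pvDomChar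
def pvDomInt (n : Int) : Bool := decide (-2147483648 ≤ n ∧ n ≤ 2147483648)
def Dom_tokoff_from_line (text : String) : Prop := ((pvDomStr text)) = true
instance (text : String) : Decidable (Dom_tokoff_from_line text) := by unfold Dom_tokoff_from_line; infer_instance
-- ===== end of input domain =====

-- B replaces A's hand-written start/end state machine with re.finditer(r"[^ ]+", text)
-- (maximal non-space runs, read off as spans); same O(n), faster by the constant factor of the C regex engine.

-- ===== PORT A =====
-- one loop step: state = (tokoff, start); the Python 'end' variable is write-only before use
def tokoffStep (s : List (Int × Int) × Option Int) (p : Int × Char) : List (Int × Int) × Option Int :=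
  let start := if p.2 ≠ ' ' ∧ s.2 = none then some p.1 else s.2
  if p.2 = ' ' ∧ start ≠ none then
    match start with
    | some a => (s.1 ++ [(a, p.1)], none)
    | none => (s.1, start)
  else (s.1, start)

def tokoff_from_line (text : String) : List (Int × Int) :=
  let st := (PySem.List.enumerate text.toList).foldl tokoffStep ([], none)
  match st.2 with
  | some a => st.1 ++ [(a, (text.toList.length : Int))]   -- ii + 1 at loop exit = len(text)
  | none => st.1

-- ===== PORT B =====
-- hand port of re.finditer(r"[^ ]+", text): scan for the next non-space, then run to the
-- end of the maximal non-space block; exact for this regex on any string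
mutual
def reSkip : List Char → Int → List (Int × Int)
  | [], _ => []
  | c :: rest, i => if c = ' ' then reSkip rest (i + 1) else reTok i rest (i + 1)
def reTok (s : Int) : List Char → Int → List (Int × Int)
  | [], i => [(s, i)]
  | c :: rest, i => if c = ' ' then (s, i) :: reSkip rest (i + 1) else reTok s rest (i + 1)
end

def tokoff_from_line_alt (text : String) : List (Int × Int) :=
  reSkip text.toList 0

-- ===== PRECONDITION & SPEC =====
def Spec_tokoff_from_line (text : String) (out : List (Int × Int)) : Prop := out = tokoff_from_line_alt text
instance (text : String) (out : List (Int × Int)) : Decidable (Spec_tokoff_from_line text out) := by unfold Spec_tokoff_from_line; infer_instance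

-- ===== CLAIM (what is proved, stated in full; the proofs are below) =====
def Claim_equal_tokoff_from_line : Prop := ∀ (text : String), Dom_tokoff_from_line text → Spec_tokoff_from_line text (tokoff_from_line text)

-- ===== LEMMAS AND PROOFS =====

def tokoffFinal (st : List (Int × Int) × Option Int) (e : Int) : List (Int × Int) :=
  match st.2 with
  | some a => st.1 ++ [(a, e)]
  | none => st.1

theorem tokoff_loop_eq : ∀ (cs : List Char) (i : Int) (acc : List (Int × Int)) (st : Option Int),
    tokoffFinal ((PySem.List.enumerate cs i).foldl tokoffStep (acc, st)) (i + cs.length)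
      = acc ++ (match st with | none => reSkip cs i | some a => reTok a cs i) := by
  intro cs
  induction cs with
  | nil =>
    intro i acc st
    cases st <;> simp [PySem.List.enumerate, tokoffFinal, reSkip, reTok]
  | cons c rest ih =>
    intro i acc st
    rw [PySem.List.enumerate_cons]
    by_cases hc : c = ' '
    · cases st with
      | none =>
        simp only [List.foldl_cons, tokoffStep, hc]
        simp only [List.length_cons]
        have : i + ((rest.length : Int) + 1) = (i + 1) + rest.length := by ring
        push_cast
        rw [this, ih]
        simp [reSkip]
      | some a =>
        simp only [List.foldl_cons, tokoffStep, hc]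
        simp only [List.length_cons]
        have : i + ((rest.length : Int) + 1) = (i + 1) + rest.length := by ring
        push_cast
        rw [this, ih]
        simp [reTok]
    · cases st with
      | none =>
        simp only [List.foldl_cons, tokoffStep, hc]
        simp only [List.length_cons]
        have : i + ((rest.length : Int) + 1) = (i + 1) + rest.length := by ring
        push_cast
        rw [this, ih]
        simp [reSkip, hc]
      | some a =>
        simp only [List.foldl_cons, tokoffStep, hc]
        simp only [List.length_cons]
        have : i + ((rest.length : Int) + 1) = (i + 1) + rest.length := by ring
        push_cast
        rw [this, ih]
        simp [reTok, hc]

-- ===== VERDICT (by name: the statement is the Claim_ definition above) =====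
theorem tokoff_from_line_spec : Claim_equal_tokoff_from_line := by
  intro text _
  show tokoff_from_line text = tokoff_from_line_alt text
  have h := tokoff_loop_eq text.toList 0 [] none
  simpa [tokoff_from_line, tokoff_from_line_alt, tokoffFinal] using h
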